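-- pv_equiv track=rewrite | github.com/maissen/my-twitter-bot | Desktop/twitter bot/my_functions.py | input_hashtags
-- ===== SOURCE A (Python) =====
-- def input_hashtags(hashtags_input):
--     hashtags_list = hashtags_input.split()
--     for i, item in enumerate(hashtags_list):
--         if item.find("#") > -1:
--             item = item.replace("#", "")
--             if item.find("#") == -1:
--                 hashtags_list[i] = item
--
--     return [tag for tag in hashtags_list if tag]  # Filter out empty strings
-- ===== SOURCE B (Python) =====
-- def input_hashtags(hashtags_input):
--     return hashtags_input.replace("#", "").split()
-- ===== Notes on version B (the rewrite author's own statement) =====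
-- stated objective: simpler
-- what changed: One global '#'-removal on the whole string followed by a single split replaces A's split + indexed per-token mutation loop + explicit empty filter; split() never yields empty strings, so the filter disappears.
import Mathlib
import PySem

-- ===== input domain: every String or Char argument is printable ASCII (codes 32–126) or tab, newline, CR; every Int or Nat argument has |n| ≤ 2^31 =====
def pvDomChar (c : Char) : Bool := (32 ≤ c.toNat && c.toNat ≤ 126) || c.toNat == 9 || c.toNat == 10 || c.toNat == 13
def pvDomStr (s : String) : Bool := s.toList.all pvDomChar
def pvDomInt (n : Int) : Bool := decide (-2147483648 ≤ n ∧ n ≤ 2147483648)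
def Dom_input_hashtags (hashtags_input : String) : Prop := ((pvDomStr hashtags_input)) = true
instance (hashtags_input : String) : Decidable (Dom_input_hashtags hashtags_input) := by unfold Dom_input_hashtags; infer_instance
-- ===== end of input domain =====

-- B removes every '#' from the whole string first and then splits once, relying on
-- split() never yielding empty strings; no per-token loop, no explicit empty filter.

-- ===== PORT A =====
-- literal transliteration of A: split, then an indexed loop mutating the list in
-- place (each index written is the current enumerate index, so the iterated items
-- are the original tokens), then the comprehension filtering out empty strings.
def input_hashtags (hashtags_input : String) : List String :=
  let hashtags_list := PySem.Str.split₀ hashtags_input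
  let hashtags_list :=
    (PySem.List.enumerate hashtags_list).foldl
      (fun lst p =>
        let item := p.2
        if PySem.Str.find item "#" > -1 then
          let item := PySem.Str.replace item "#" ""
          if PySem.Str.find item "#" = -1 then
            lst.set p.1.toNat item   -- hashtags_list[i] = item (index always in range)
          else lst
        else lst)
      hashtags_list
  hashtags_list.filter (fun tag => !(tag == ""))  -- [tag for tag in hashtags_list if tag]

-- ===== PORT B =====
def input_hashtags_alt (hashtags_input : String) : List String :=
  PySem.Str.split₀ (PySem.Str.replace hashtags_input "#" "")

-- ===== PRECONDITION & SPEC =====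
def Spec_input_hashtags (hashtags_input : String) (out : List String) : Prop := out = input_hashtags_alt hashtags_input
instance (hashtags_input : String) (out : List String) : Decidable (Spec_input_hashtags hashtags_input out) := by unfold Spec_input_hashtags; infer_instance

-- ===== CLAIM (what is proved, stated in full; the proofs are below) =====
def Claim_equal_input_hashtags : Prop := ∀ (hashtags_input : String), Dom_input_hashtags hashtags_input → Spec_input_hashtags hashtags_input (input_hashtags hashtags_input)

-- ===== LEMMAS AND PROOFS =====

-- ===== VERDICT (by name: the statement is the Claim_ definition above) =====

-- helper predicate: keep characters that are not '#'
def pvKeep (c : Char) : Bool := !(c == '#')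

-- replace.go with old = ['#'], new = [] is exactly a filter
theorem pv_replace_go_filter : ∀ (fuel : Nat) (l acc : List Char), l.length ≤ fuel →
    PySem.Chars.replace.go ['#'] [] fuel l acc = acc.reverse ++ l.filter pvKeep := by
  intro fuel
  induction fuel with
  | zero =>
    intro l acc h
    have : l = [] := List.eq_nil_of_length_eq_zero (Nat.le_zero.mp h)
    subst this
    simp [PySem.Chars.replace.go]
  | succ n ih =>
    intro l acc h
    cases l with
    | nil => simp [PySem.Chars.replace.go]
    | cons c t =>
      by_cases hc : c = '#'
      · subst hc
        have hp : List.isPrefixOf ['#'] ('#' :: t) = true := by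
          simp [List.isPrefixOf]
        simp only [PySem.Chars.replace.go, hp, if_pos]
        rw [ih _ _ (by simpa using Nat.le_of_succ_le_succ h)]
        simp [pvKeep]
      · have hp : List.isPrefixOf ['#'] (c :: t) = false := by
          simp only [List.isPrefixOf, Bool.and_true, beq_eq_false_iff_ne, ne_eq]
          exact fun h => hc h.symm
        simp only [PySem.Chars.replace.go, hp, Bool.false_eq_true, reduceIte]
        rw [ih _ _ (by simpa using Nat.le_of_succ_le_succ h)]
        simp [pvKeep, hc]

theorem pv_replace_hash (l : List Char) :
    PySem.Chars.replace l ['#'] [] = l.filter pvKeep := by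
  simpa [PySem.Chars.replace] using pv_replace_go_filter l.length l [] le_rfl

-- the accumulator of split₀.go only prepends
theorem pv_go_acc : ∀ (l cur : List Char) (acc : List (List Char)),
    PySem.Chars.split₀.go l cur acc = acc.reverse ++ PySem.Chars.split₀.go l cur [] := by
  intro l
  induction l with
  | nil =>
    intro cur acc
    by_cases hc : cur.isEmpty <;> simp [PySem.Chars.split₀.go, hc]
  | cons c t ih =>
    intro cur acc
    by_cases hs : PySem.Chars.isspace c
    · by_cases hc : cur.isEmpty
      · simp only [PySem.Chars.split₀.go, hs, hc, if_pos]
        exact ih [] acc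
      · simp only [PySem.Chars.split₀.go, hs, hc, Bool.false_eq_true, if_true, reduceIte]
        rw [ih [] (cur.reverse :: acc), ih [] [cur.reverse]]
        simp
    · simp only [PySem.Chars.split₀.go, hs, Bool.false_eq_true, reduceIte]
      exact ih (c :: cur) acc

theorem pv_infix_singleton (a : Char) (l : List Char) : [a] <:+: l ↔ a ∈ l := by
  constructor
  · intro h
    exact (List.singleton_sublist).mp h.sublist
  · intro h
    obtain ⟨s, t, rfl⟩ := List.append_of_mem h
    exact ⟨s, t, by simp⟩

-- splitting the '#'-filtered string = filtering '#' out of each word and dropping empties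
theorem pv_main_go : ∀ (l cur : List Char) (acc : List (List Char)),
    PySem.Chars.split₀.go (l.filter pvKeep) (cur.filter pvKeep) acc
      = acc.reverse ++ ((PySem.Chars.split₀.go l cur []).map (List.filter pvKeep)).filter
          (fun t => !t.isEmpty) := by
  intro l
  induction l with
  | nil =>
    intro cur acc
    by_cases hc : cur.isEmpty
    · have hc' : cur = [] := by simpa [List.isEmpty_iff] using hc
      subst hc'
      simp [PySem.Chars.split₀.go]
    · have hcne : cur ≠ [] := by simpa [List.isEmpty_iff] using hc
      by_cases hf : (cur.filter pvKeep).isEmpty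
      · simp [PySem.Chars.split₀.go, hc, List.isEmpty_iff.mp hf]
      · simp [PySem.Chars.split₀.go, hf, hc, List.filter_reverse]
  | cons c t ih =>
    intro cur acc
    by_cases hs : PySem.Chars.isspace c
    · have hkc : pvKeep c = true := by
        have : c ≠ '#' := by
          intro h; subst h; exact absurd hs (by decide)
        simp [pvKeep, this]
      by_cases hc : cur.isEmpty
      · have hc' : cur = [] := by simpa [List.isEmpty_iff] using hc
        subst hc'
        simpa [PySem.Chars.split₀.go, hs, hkc] using ih [] acc
      · have hcne : cur ≠ [] := by simpa [List.isEmpty_iff] using hc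
        by_cases hf : (cur.filter pvKeep).isEmpty
        · -- the word filters away to nothing: A drops it via the empty filter
          rw [show (c :: t).filter pvKeep = c :: t.filter pvKeep by simp [hkc]]
          simp only [PySem.Chars.split₀.go, hs, if_pos, hf, hc, Bool.false_eq_true,
            reduceIte]
          rw [pv_go_acc t [] [cur.reverse]]
          simpa [List.filter_reverse, List.isEmpty_iff.mp hf] using ih [] acc
        · rw [show (c :: t).filter pvKeep = c :: t.filter pvKeep by simp [hkc]]
          simp only [PySem.Chars.split₀.go, hs, if_pos, hf, hc, Bool.false_eq_true,
            reduceIte]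
          rw [pv_go_acc t [] [cur.reverse]]
          have hfne : (cur.reverse.filter pvKeep).isEmpty = false := by
            simp only [List.filter_reverse, List.isEmpty_reverse]
            simpa using hf
          simp only [List.reverse_singleton, List.singleton_append, List.map_cons]
          rw [List.filter_cons_of_pos (by simp only [hfne, Bool.not_false])]
          simpa [List.filter_reverse] using ih [] ((cur.filter pvKeep).reverse :: acc)
    · by_cases hk : pvKeep c
      · rw [show (c :: t).filter pvKeep = c :: t.filter pvKeep by simp [hk]]
        simp only [PySem.Chars.split₀.go, hs, Bool.false_eq_true, reduceIte]
        rw [show c :: cur.filter pvKeep = (c :: cur).filter pvKeep by simp [hk]]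
        exact ih (c :: cur) acc
      · rw [show (c :: t).filter pvKeep = t.filter pvKeep by simp [hk]]
        simp only [PySem.Chars.split₀.go, hs, Bool.false_eq_true, reduceIte]
        rw [show cur.filter pvKeep = (c :: cur).filter pvKeep by simp [hk]]
        exact ih (c :: cur) acc

-- per-token value of A's loop body
def pvG (t : String) : String := String.ofList (t.toList.filter pvKeep)

theorem pv_step (pre rest : List String) (t : String) :
    (fun (lst : List String) (p : Int × String) =>
        let item := p.2
        if PySem.Str.find item "#" > -1 then
          let item := PySem.Str.replace item "#" ""
          if PySem.Str.find item "#" = -1 then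
            lst.set p.1.toNat item
          else lst
        else lst) (pre ++ t :: rest) ((pre.length : Int), t) = pre ++ pvG t :: rest := by
  have htl : ("#" : String).toList = ['#'] := by decide
  simp only [PySem.Str.find, PySem.Str.replace, htl]
  by_cases hm : '#' ∈ t.toList
  · have hfind : PySem.Chars.find t.toList ['#'] > -1 := by
      have h0 : (0 : Int) ≤ PySem.Chars.find t.toList ['#'] :=
        (PySem.Chars.find_nonneg_iff _ _).mpr ((pv_infix_singleton _ _).mpr hm)
      omega
    have hrep : PySem.Chars.replace t.toList ['#'] [] = t.toList.filter pvKeep := by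
      simpa using pv_replace_hash t.toList
    have hnm : '#' ∉ t.toList.filter pvKeep := by
      intro h
      have := (List.mem_filter.mp h).2
      simp [pvKeep] at this
    have hfind2 : PySem.Chars.find (String.ofList (t.toList.filter pvKeep)).toList ['#'] = -1 := by
      rw [PySem.Chars.find_eq_neg_one_iff]
      intro h
      exact hnm ((pv_infix_singleton _ _).mp (by simpa using h))
    have hfind2' : PySem.Chars.find (t.toList.filter pvKeep) ['#'] = -1 := by
      simpa using hfind2
    have : ((pre.length : Int)).toNat = pre.length := by simp
    simp [hfind, hrep, hfind2', this, pvG]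
  · have hfind : ¬ (PySem.Chars.find t.toList ['#'] > -1) := by
      have h1 : PySem.Chars.find t.toList ['#'] = -1 := by
        rw [PySem.Chars.find_eq_neg_one_iff]
        intro h
        exact hm ((pv_infix_singleton _ _).mp h)
      omega
    have hid : t.toList.filter pvKeep = t.toList :=
      List.filter_eq_self.mpr (fun c hc => by
        simp only [pvKeep, Bool.not_eq_eq_eq_not, Bool.not_true, beq_eq_false_iff_ne, ne_eq]
        intro h; subst h; exact hm hc)
    simp [hfind, pvG, hid]

theorem pv_fold_enum : ∀ (l pre : List String),
    (PySem.List.enumerate l (pre.length : Int)).foldl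
      (fun (lst : List String) (p : Int × String) =>
        let item := p.2
        if PySem.Str.find item "#" > -1 then
          let item := PySem.Str.replace item "#" ""
          if PySem.Str.find item "#" = -1 then
            lst.set p.1.toNat item
          else lst
        else lst) (pre ++ l) = pre ++ l.map pvG := by
  intro l
  induction l with
  | nil => intro pre; simp [PySem.List.enumerate]
  | cons t rest ih =>
    intro pre
    rw [show PySem.List.enumerate (t :: rest) (pre.length : Int)
        = ((pre.length : Int), t) :: PySem.List.enumerate rest ((pre.length : Int) + 1) by
      simp [PySem.List.enumerate]]
    rw [List.foldl_cons]
    rw [show (let item := (((pre.length : Int), t)).2;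
          if PySem.Str.find item "#" > -1 then
            let item := PySem.Str.replace item "#" "";
            if PySem.Str.find item "#" = -1 then
              (pre ++ t :: rest).set (((pre.length : Int), t)).1.toNat item
            else pre ++ t :: rest
          else pre ++ t :: rest) = pre ++ pvG t :: rest from pv_step pre rest t]
    have h1 : ((pre.length : Int) + 1) = ((pre ++ [pvG t]).length : Int) := by
      simp
    have h2 : pre ++ pvG t :: rest = (pre ++ [pvG t]) ++ rest := by simp
    rw [h1, h2, ih (pre ++ [pvG t])]
    simp

theorem pv_fold_enum0 (l : List String) :
    (PySem.List.enumerate l 0).foldl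
      (fun (lst : List String) (p : Int × String) =>
        let item := p.2
        if PySem.Str.find item "#" > -1 then
          let item := PySem.Str.replace item "#" ""
          if PySem.Str.find item "#" = -1 then
            lst.set p.1.toNat item
          else lst
        else lst) l = l.map pvG :=
  pv_fold_enum l []

theorem pv_ofList_beq_empty (v : List Char) : (String.ofList v == "") = v.isEmpty := by
  rcases v with _ | ⟨c, t⟩
  · simp
  · simp only [List.isEmpty_cons, beq_eq_false_iff_ne, ne_eq]
    intro h
    have := congrArg String.toList h
    simp at this

theorem input_hashtags_spec : Claim_equal_input_hashtags := by
  unfold Claim_equal_input_hashtags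
  intro s _
  unfold Spec_input_hashtags
  have hA : input_hashtags s =
      ((PySem.List.enumerate (PySem.Str.split₀ s) 0).foldl
        (fun (lst : List String) (p : Int × String) =>
          let item := p.2
          if PySem.Str.find item "#" > -1 then
            let item := PySem.Str.replace item "#" ""
            if PySem.Str.find item "#" = -1 then
              lst.set p.1.toNat item
            else lst
          else lst) (PySem.Str.split₀ s)).filter (fun tag => !(tag == "")) := rfl
  rw [hA, pv_fold_enum0 (PySem.Str.split₀ s)]
  unfold input_hashtags_alt
  -- B side: replace = filter, then split of the filtered string
  have hrep : (PySem.Str.replace s "#" "").toList = s.toList.filter pvKeep := by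
    simp only [PySem.Str.replace]
    rw [show ("#" : String).toList = ['#'] by decide]
    simpa using pv_replace_hash s.toList
  have hmain := pv_main_go s.toList [] []
  simp only [List.filter_nil, List.reverse_nil, List.nil_append] at hmain
  simp only [PySem.Str.split₀]
  rw [hrep]
  rw [show PySem.Chars.split₀ (s.toList.filter pvKeep)
      = PySem.Chars.split₀.go (s.toList.filter pvKeep) [] [] from rfl]
  rw [hmain]
  rw [show PySem.Chars.split₀.go s.toList [] [] = PySem.Chars.split₀ s.toList from rfl]
  -- both sides over M := Chars.split₀ s.toList
  rw [List.map_map, List.filter_map, List.filter_map, List.map_map]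
  congr 1
  · funext w
    simp [pvG]
  · apply List.filter_congr
    intro w _
    simp only [Function.comp_apply, pvG, pv_ofList_beq_empty]
    simp
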